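-- pv_equiv track=rewrite | github.com/anmolsahu2k/WhatsApp-Twin | src/whatsapp_twin/ingestion/style_analyzer.py | _detect_farewells
-- ===== SOURCE A (Python) =====
-- def _detect_farewells(texts: list[str]) -> list[str]:
--     """Detect farewell patterns."""
--     farewells = ["bye", "cya", "later", "goodnight", "gn", "chal",
--                  "ttyl", "tc", "take care", "night"]
--     found = []
--     for f in farewells:
--         for text in texts:
--             if f in text.lower():
--                 found.append(f)
--                 break
--     return found
-- ===== SOURCE B (Python) =====
-- def _detect_farewells(texts: list[str]) -> list[str]:
--     """Detect farewell patterns."""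
--     farewells = ["bye", "cya", "later", "goodnight", "gn", "chal",
--                  "ttyl", "tc", "take care", "night"]
--     combined = "\n".join(t.lower() for t in texts)
--     return [f for f in farewells if f in combined]
-- ===== Notes on version B (the rewrite author's own statement) =====
-- stated objective: faster
-- what changed: B lowers and joins all texts once into a single newline-separated blob and then filters the farewell list with one substring test each, replacing A's nested per-farewell scan over the texts (which re-lowers every text for every farewell); correct because no farewell contains a newline, so a match in the blob cannot span two texts.
import Mathlib
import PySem

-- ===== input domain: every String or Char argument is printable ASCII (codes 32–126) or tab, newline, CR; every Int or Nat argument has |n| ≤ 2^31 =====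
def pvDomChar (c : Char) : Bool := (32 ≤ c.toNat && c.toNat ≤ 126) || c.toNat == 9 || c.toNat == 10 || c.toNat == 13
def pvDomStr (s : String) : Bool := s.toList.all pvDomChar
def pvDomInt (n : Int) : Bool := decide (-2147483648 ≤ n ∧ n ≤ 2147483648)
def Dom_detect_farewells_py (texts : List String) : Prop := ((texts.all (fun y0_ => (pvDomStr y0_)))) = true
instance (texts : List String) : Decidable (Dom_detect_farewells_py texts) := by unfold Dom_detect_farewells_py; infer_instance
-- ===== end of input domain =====

-- B joins all lowered texts into one newline-separated blob and filters the farewell list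
-- with one substring test each (simpler: no nested scan with break); return values proved equal.

-- ===== PORT A =====
def pvFarewellsA : List String :=
  ["bye", "cya", "later", "goodnight", "gn", "chal", "ttyl", "tc", "take care", "night"]

-- inner 'for text in texts: if f in text.lower(): append; break' — true iff the break fires
def pvInnerA (f : String) : List String → Bool
  | [] => false
  | text :: rest =>
    if PySem.Str.isIn f (PySem.Str.lower text) then true else pvInnerA f rest

def detect_farewells_py (texts : List String) : List String :=
  pvFarewellsA.foldl (fun found f => if pvInnerA f texts then found ++ [f] else found) []

-- ===== PORT B =====
def pvFarewellsB : List String :=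
  ["bye", "cya", "later", "goodnight", "gn", "chal", "ttyl", "tc", "take care", "night"]

def detect_farewells_py_alt (texts : List String) : List String :=
  let combined := PySem.Str.join "\n" (texts.map PySem.Str.lower)
  pvFarewellsB.filter (fun f => PySem.Str.isIn f combined)

-- ===== PRECONDITION & SPEC =====
def Spec_detect_farewells_py (texts : List String) (out : List String) : Prop := out = detect_farewells_py_alt texts
instance (texts : List String) (out : List String) : Decidable (Spec_detect_farewells_py texts out) := by unfold Spec_detect_farewells_py; infer_instance

-- ===== CLAIM (what is proved, stated in full; the proofs are below) =====
def Claim_equal_detect_farewells_py : Prop := ∀ (texts : List String), Dom_detect_farewells_py texts → Spec_detect_farewells_py texts (detect_farewells_py texts)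

-- ===== LEMMAS AND PROOFS =====

-- A's inner break-loop fires iff some text (lowered) contains f
theorem pvInnerA_eq_any (f : String) (texts : List String) :
    pvInnerA f texts = texts.any (fun t => PySem.Str.isIn f (PySem.Str.lower t)) := by
  induction texts with
  | nil => rfl
  | cons t rest ih =>
    simp only [pvInnerA, List.any_cons]
    by_cases h : PySem.Str.isIn f (PySem.Str.lower t) = true <;> simp [ih]

-- a prefix of some suffix of a ++ c :: b that avoids c lies inside a or inside b
theorem pvPrefix_split {f a b : List Char} {c : Char} (hc : c ∉ f) (j : ℕ)
    (h : f <+: (a ++ c :: b).drop j) :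
    (∃ i, f <+: a.drop i) ∨ (∃ i, f <+: b.drop i) := by
  by_cases hj : j ≤ a.length
  · rw [List.drop_append, Nat.sub_eq_zero_of_le hj, List.drop_zero] at h
    by_cases hlen : f.length ≤ (a.drop j).length
    · left
      refine ⟨j, ?_⟩
      rw [List.prefix_iff_eq_take] at h ⊢
      rwa [List.take_append_of_le_length hlen] at h
    · -- position (a.drop j).length of f is c, contradiction
      exfalso
      push Not at hlen
      have hidx : (a.drop j).length < f.length := hlen
      have := h.getElem hidx
      rw [List.getElem_append_right (Nat.le_refl _)] at this
      simp only [Nat.sub_self, List.getElem_cons_zero] at this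
      exact hc (this ▸ List.getElem_mem hidx)
  · right
    push Not at hj
    rw [List.drop_append, List.drop_eq_nil_of_le (Nat.le_of_lt hj), List.nil_append] at h
    have h1 : 1 ≤ j - a.length := by omega
    refine ⟨j - a.length - 1, ?_⟩
    have heq : j - a.length = (j - a.length - 1) + 1 := by omega
    rw [heq, List.drop_succ_cons] at h
    exact h

-- 'f in a ++ c::b' ↔ 'f in a or f in b' for nonempty f avoiding c
theorem pvIsIn_append_cons (f a b : List Char) (c : Char) (hc : c ∉ f) (hf : f ≠ []) :
    PySem.Chars.isIn f (a ++ c :: b) = (PySem.Chars.isIn f a || PySem.Chars.isIn f b) := by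
  rw [Bool.eq_iff_iff, Bool.or_eq_true]
  rw [← PySem.Chars.exists_prefix_drop_iff_isIn, ← PySem.Chars.exists_prefix_drop_iff_isIn,
      ← PySem.Chars.exists_prefix_drop_iff_isIn]
  constructor
  · rintro ⟨j, h⟩
    exact pvPrefix_split hc j h
  · rintro (⟨i, h⟩ | ⟨i, h⟩)
    · refine ⟨i, ?_⟩
      have hi : i ≤ a.length := by
        by_contra hgt
        push Not at hgt
        rw [List.drop_eq_nil_of_le (Nat.le_of_lt hgt)] at h
        exact hf (List.prefix_nil.mp h)
      rw [List.drop_append, Nat.sub_eq_zero_of_le hi, List.drop_zero]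
      exact h.trans (List.prefix_append _ _)
    · refine ⟨a.length + 1 + i, ?_⟩
      rw [List.drop_append, List.drop_eq_nil_of_le (by omega), List.nil_append]
      have : a.length + 1 + i - a.length = i + 1 := by omega
      rwa [this, List.drop_succ_cons]

-- 'f in join "\n" parts' ↔ 'f in some part', for nonempty newline-free f
theorem pvIsIn_join (f : List Char) (hc : '\n' ∉ f) (hf : f ≠ []) :
    ∀ parts : List (List Char),
      PySem.Chars.isIn f (PySem.Chars.join ['\n'] parts) = parts.any (PySem.Chars.isIn f)
  | [] => by
    rw [PySem.Chars.join_nil, List.any_nil]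
    rw [Bool.eq_false_iff, Ne, PySem.Chars.isIn_iff_infix]
    intro h
    exact hf (List.infix_nil.mp h)
  | [p] => by rw [PySem.Chars.join_singleton, List.any_cons, List.any_nil, Bool.or_false]
  | p :: q :: rest => by
    rw [PySem.Chars.join_cons_cons, List.append_assoc, List.singleton_append,
        pvIsIn_append_cons f p _ '\n' hc hf, pvIsIn_join f hc hf (q :: rest)]
    simp [List.any_cons]

-- every farewell is nonempty and newline-free
theorem pvFarewells_ok : ∀ f ∈ pvFarewellsB, '\n' ∉ f.toList ∧ f.toList ≠ [] := by decide

-- ===== VERDICT (by name: the statement is the Claim_ definition above) =====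
theorem detect_farewells_py_spec : Claim_equal_detect_farewells_py := by
  intro texts _
  show detect_farewells_py texts = detect_farewells_py_alt texts
  unfold detect_farewells_py detect_farewells_py_alt
  rw [PySem.List.foldl_append_if_eq_filter]
  simp only [List.nil_append]
  have hAB : pvFarewellsA = pvFarewellsB := rfl
  rw [hAB]
  apply List.filter_congr
  intro f hf
  obtain ⟨hnl, hne⟩ := pvFarewells_ok f hf
  rw [pvInnerA_eq_any, PySem.Str.isIn_eq, PySem.Str.toList_join]
  have hsep : ("\n" : String).toList = ['\n'] := rfl
  rw [hsep, pvIsIn_join f.toList hnl hne, List.map_map, List.any_map]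
  have hfun : (fun t => PySem.Str.isIn f (PySem.Str.lower t))
      = (PySem.Chars.isIn f.toList ∘ String.toList ∘ PySem.Str.lower) := by
    funext t
    rw [Function.comp_apply, Function.comp_apply, PySem.Str.isIn_eq]
  rw [hfun]
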